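-- pv_equiv track=rewrite | github.com/pypi-data/pypi-mirror-62 | packages/selkie/selkie-0.21.5-py3-none-any.whl/seal/cld/corpus/lexicon.py | parse_lexid
-- ===== SOURCE A (Python) =====
-- def parse_lexid (s):
--     n = len(s)
--     while n > 0 and s[n-1].isdigit(): n -= 1
--     if n > 0 and s[n-1] == '.':
--         form = s[:n-1]
--         sense = int(s[n:])
--     else:
--         form = s
--         sense = 0
--     return (form, sense)
-- ===== SOURCE B (Python) =====
-- def parse_lexid(s):
--     head, dot, tail = s.rpartition('.')
--     if dot and all(c.isdigit() for c in tail):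
--         return (head, int(tail))
--     return (s, 0)
-- ===== Notes on version B (the rewrite author's own statement) =====
-- stated objective: idiomatic
-- what changed: B finds the separator first with str.rpartition('.') and then validates that the suffix is all digits, instead of A's index-based backward scan over trailing digits followed by a dot check.
-- outside the precondition, e.g. on parse_lexid('.'): A raises ValueError, B raises ValueError
import Mathlib
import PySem

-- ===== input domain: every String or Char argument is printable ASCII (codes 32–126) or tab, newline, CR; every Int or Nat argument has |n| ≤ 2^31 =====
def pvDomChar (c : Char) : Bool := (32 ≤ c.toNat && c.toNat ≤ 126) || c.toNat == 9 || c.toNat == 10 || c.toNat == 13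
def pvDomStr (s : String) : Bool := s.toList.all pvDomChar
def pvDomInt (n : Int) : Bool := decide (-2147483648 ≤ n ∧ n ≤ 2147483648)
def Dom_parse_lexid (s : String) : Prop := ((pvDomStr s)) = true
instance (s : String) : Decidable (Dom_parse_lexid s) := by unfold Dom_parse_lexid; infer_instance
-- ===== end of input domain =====

-- B splits with rpartition('.') and validates the suffix, instead of A's backward index scan; same cost, more idiomatic.

-- ===== PORT A =====
-- the 'while n > 0 and s[n-1].isdigit(): n -= 1' loop, recursing on n
def pvACount (cs : List Char) : Nat → Nat
  | 0 => 0
  | n + 1 => if PySem.Chars.isdigit (cs.getD n ' ') then pvACount cs n else n + 1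

def parse_lexid (s : String) : String × Int :=
  let cs := s.toList
  let n := pvACount cs cs.length
  if 0 < n ∧ cs.getD (n - 1) ' ' = '.' then
    -- int(s[n:]) cannot fail inside Pre_ (the digit run is nonempty), so getD 0 is never taken
    (String.ofList (cs.take (n - 1)), (PySem.Int.ofChars? (cs.drop n)).getD 0)
  else (s, 0)

-- ===== PORT B =====
-- s.rpartition('.') : none = no '.' in s; some (head, tail) = the parts around the LAST '.'
def pvRPartitionDot (cs : List Char) : Option (List Char × List Char) :=
  let rev := cs.reverse
  if '.' ∈ rev then
    some (((rev.dropWhile (· ≠ '.')).drop 1).reverse, (rev.takeWhile (· ≠ '.')).reverse)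
  else none

def parse_lexid_alt (s : String) : String × Int :=
  let cs := s.toList
  match pvRPartitionDot cs with
  | some (head, tail) =>
      if tail.all PySem.Chars.isdigit then
        -- int(tail) cannot fail inside Pre_ (tail is a nonempty digit string), so getD 0 is never taken
        (String.ofList head, (PySem.Int.ofChars? tail).getD 0)
      else (s, 0)
  | none => (s, 0)

-- ===== PRECONDITION & SPEC =====
-- Pre_ excludes exactly the strings ending in '.', on which A raises ValueError by converting the empty digit run with int (and so does B).
def Pre_parse_lexid (s : String) : Prop := s.toList.getLast? ≠ some '.'
instance (s : String) : Decidable (Pre_parse_lexid s) := by unfold Pre_parse_lexid; infer_instance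
def pvWitness_parse_lexid : String := "cat.3"

def Spec_parse_lexid (s : String) (out : String × Int) : Prop := out = parse_lexid_alt s
instance (s : String) (out : String × Int) : Decidable (Spec_parse_lexid s out) := by unfold Spec_parse_lexid; infer_instance

-- ===== CLAIM (what is proved, stated in full; the proofs are below) =====
def Claim_equal_parse_lexid : Prop := ∀ (s : String), Dom_parse_lexid s → Pre_parse_lexid s → Spec_parse_lexid s (parse_lexid s)

-- ===== LEMMAS AND PROOFS =====

theorem pvDropWhileHead {α : Type} (p : α → Bool) :
    ∀ (l : List α) (a : α) (t : List α), l.dropWhile p = a :: t → p a = false := by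
  intro l
  induction l with
  | nil => intro a t h; simp at h
  | cons x xs ih =>
    intro a t h
    rw [List.dropWhile_cons] at h
    by_cases hx : p x
    · exact ih a t (by simpa [hx] using h)
    · simp only [hx] at h
      cases h
      simpa using hx

theorem pvACount_append (xs : List Char) (c : Char) (m : Nat) (h : m ≤ xs.length) :
    pvACount (xs ++ [c]) m = pvACount xs m := by
  induction m with
  | zero => rfl
  | succ n ih =>
    have hn : n < xs.length := by omega
    simp only [pvACount, List.getD_append _ _ _ _ hn, ih (by omega)]

-- A's loop lands at (length of s) minus (number of trailing digit characters)
theorem pvACount_eq (cs : List Char) :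
    pvACount cs cs.length = cs.length - (cs.reverse.takeWhile PySem.Chars.isdigit).length := by
  induction cs using List.reverseRecOn with
  | nil => rfl
  | append_singleton xs c ih =>
    have hk : (xs.reverse.takeWhile PySem.Chars.isdigit).length ≤ xs.length := by
      simpa using (List.takeWhile_prefix (l := xs.reverse) PySem.Chars.isdigit).length_le
    simp only [List.length_append, List.length_singleton, List.reverse_append,
      List.reverse_singleton, List.singleton_append, List.takeWhile_cons]
    by_cases hd : PySem.Chars.isdigit c
    · simp only [hd, if_pos, pvACount,
        List.getD_append_right _ _ _ _ (le_refl xs.length), Nat.sub_self]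
      simp only [List.getD, List.getElem?_cons_zero, Option.getD_some, hd, if_true]
      rw [pvACount_append xs c xs.length (le_refl _), ih]
      simp only [List.length_cons]
      omega
    · simp only [hd, pvACount,
        List.getD_append_right _ _ _ _ (le_refl xs.length), Nat.sub_self]
      simp only [List.getD, List.getElem?_cons_zero, Option.getD_some, hd]
      simp

-- ===== VERDICT (the statement is the Claim_ definition above) =====
theorem parse_lexid_spec : Claim_equal_parse_lexid := by
  intro s _hdom _hpre
  unfold Spec_parse_lexid parse_lexid parse_lexid_alt pvRPartitionDot
  by_cases hmem : '.' ∈ s.toList.reverse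
  · -- there is a dot: decompose s.toList.reverse = pre ++ '.' :: post
    obtain ⟨post, hrest⟩ :
        ∃ post, s.toList.reverse.dropWhile (· ≠ '.') = '.' :: post := by
      have hne : s.toList.reverse.dropWhile (· ≠ '.') ≠ [] := by
        intro h
        have := List.dropWhile_eq_nil_iff.mp h '.' hmem
        simp at this
      cases hd : s.toList.reverse.dropWhile (· ≠ '.') with
      | nil => exact absurd hd hne
      | cons r0 post =>
        have hh := pvDropWhileHead (fun x => decide (x ≠ '.')) _ _ _ hd
        simp at hh
        exact ⟨post, by rw [hh]⟩
    obtain ⟨pre, hpredef⟩ :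
        ∃ p, s.toList.reverse.takeWhile (· ≠ '.') = p := ⟨_, rfl⟩
    have hrev : s.toList.reverse = pre ++ '.' :: post := by
      conv_lhs => rw [← List.takeWhile_append_dropWhile
        (p := fun x => decide (x ≠ '.')) (l := s.toList.reverse)]
      rw [hrest, hpredef]
    have hcs : s.toList = post.reverse ++ ['.'] ++ pre.reverse := by
      have h := congrArg List.reverse hrev
      simp only [List.reverse_reverse, List.reverse_append, List.reverse_cons] at h
      simpa [List.append_assoc] using h
    have hpre : ∀ x ∈ pre, x ≠ '.' := by
      intro x hx
      rw [← hpredef] at hx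
      have h1 := List.mem_takeWhile_imp hx
      simpa using h1
    have hlen : s.toList.length = post.length + 1 + pre.length := by
      rw [hcs]; simp; omega
    simp only [pvACount_eq, hpredef, hrest, hmem, if_true]
    by_cases hall : pre.all PySem.Chars.isdigit
    · -- suffix is all digits: both sides split at the last dot
      have htw : pre.takeWhile PySem.Chars.isdigit = pre :=
        List.takeWhile_eq_self_iff.mpr (by simpa [List.all_eq_true] using hall)
      have hdotnd : PySem.Chars.isdigit '.' = false := by decide
      have hk : s.toList.reverse.takeWhile PySem.Chars.isdigit = pre := by
        rw [hrev, List.takeWhile_append, htw, if_pos rfl, List.takeWhile_cons]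
        simp only [hdotnd]
        simp
      rw [hk]
      have hn2 : s.toList.length - pre.length = post.length + 1 := by omega
      rw [hn2]
      have hgd : s.toList.getD (post.length + 1 - 1) ' ' = '.' := by
        rw [hcs, List.append_assoc, List.getD_append_right _ _ _ _ (by simp)]
        simp
      rw [if_pos ⟨Nat.succ_pos _, hgd⟩]
      have htake : s.toList.take (post.length + 1 - 1) = post.reverse := by
        rw [hcs, List.append_assoc]
        exact List.take_left' (l₁ := post.reverse)
          (show post.reverse.length = post.length + 1 - 1 by simp)
      have hdrop : s.toList.drop (post.length + 1) = pre.reverse := by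
        rw [hcs]
        exact List.drop_left' (l₁ := post.reverse ++ ['.'])
          (show (post.reverse ++ ['.']).length = post.length + 1 by simp)
      rw [htake, hdrop, if_pos (show pre.reverse.all PySem.Chars.isdigit = true by
        rw [List.all_reverse]; exact hall)]
      simp
    · -- suffix contains a non-digit: both sides return (s, 0)
      have hne2 : pre.takeWhile PySem.Chars.isdigit ≠ pre := by
        intro h
        exact hall (by simpa [List.all_eq_true] using List.takeWhile_eq_self_iff.mp h)
      have hklt : (pre.takeWhile PySem.Chars.isdigit).length < pre.length := by
        rcases Nat.lt_or_ge (pre.takeWhile PySem.Chars.isdigit).length pre.length with h | h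
        · exact h
        · exact absurd ((List.takeWhile_prefix _).eq_of_length
            (Nat.le_antisymm (List.takeWhile_prefix _).length_le h)) hne2
      have hkeq : s.toList.reverse.takeWhile PySem.Chars.isdigit
          = pre.takeWhile PySem.Chars.isdigit := by
        rw [hrev, List.takeWhile_append, if_neg (by omega)]
      rw [hkeq, if_neg (show ¬ pre.reverse.all PySem.Chars.isdigit = true by
        rw [List.all_reverse]; simp [hall]), if_neg]
      rintro ⟨h1, h2⟩
      have hlt : s.toList.length - (pre.takeWhile PySem.Chars.isdigit).length - 1
          < s.toList.length := by omega
      rw [List.getD_eq_getElem _ _ hlt] at h2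
      have hkrev : (pre.takeWhile PySem.Chars.isdigit).length < s.toList.reverse.length := by
        simp only [List.length_reverse]; omega
      have e1 : s.toList[s.toList.length - (pre.takeWhile PySem.Chars.isdigit).length - 1]'hlt
          = s.toList.reverse[(pre.takeWhile PySem.Chars.isdigit).length]'hkrev := by
        rw [List.getElem_reverse]
        congr 1
        omega
      have e2 : s.toList.reverse[(pre.takeWhile PySem.Chars.isdigit).length]'hkrev
          = pre[(pre.takeWhile PySem.Chars.isdigit).length]'hklt := by
        rw [List.getElem_of_eq hrev, List.getElem_append_left hklt]
      exact hpre _ (List.getElem_mem hklt) (by rw [← e2, ← e1, h2])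
  · -- no dot anywhere: both sides return (s, 0)
    have hnomem : '.' ∉ s.toList := by simpa using hmem
    simp only [pvACount_eq, hmem, if_false]
    rw [if_neg]
    rintro ⟨h1, h2⟩
    have hlt : s.toList.length - (s.toList.reverse.takeWhile PySem.Chars.isdigit).length - 1
        < s.toList.length := by omega
    rw [List.getD_eq_getElem _ _ hlt] at h2
    exact hnomem (h2 ▸ List.getElem_mem hlt)
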